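-- pv_equiv track=rewrite | github.com/LaboratorioSperimentale/asr-assisted-transcription | src/asr_analysis/process_text.py | check_angular_parentheses
-- ===== SOURCE A (Python) =====
-- def check_angular_parentheses(annotation):
--
-- 	fastsequence = False   # >....<
-- 	slowsequence = False    # <.....>
-- 	for char in annotation:
-- 		if char == "<":
-- 			if fastsequence:
-- 				fastsequence = False
-- 			elif not slowsequence:
-- 				slowsequence = True
--
-- 		elif char == ">":
-- 			if slowsequence:
-- 				slowsequence = False
-- 			elif not fastsequence:
-- 				fastsequence = True
--
-- 	if fastsequence or slowsequence:
-- 		return False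
-- 	return True
-- ===== SOURCE B (Python) =====
-- def check_angular_parentheses(annotation):
--     # Two-stage: extract the brackets, then jump through them in opener/closer
--     # pairs, skipping whole runs of same-direction repeats (no per-char state).
--     brackets = [c for c in annotation if c in "<>"]
--     i, n = 0, len(brackets)
--     while i < n:
--         opener = brackets[i]
--         j = i + 1
--         while j < n and brackets[j] == opener:
--             j += 1
--         if j == n:
--             return False
--         i = j + 1
--     return True
-- ===== Notes on version B (the rewrite author's own statement) =====
-- stated objective: alternative
-- what changed: Replaces the per-character two-boolean state machine with a staged algorithm: first filter the brackets into a list, then jump through that list in opener/closer pairs, skipping each run of same-direction repeats wholesale, with no per-character state variable.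
import Mathlib
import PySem

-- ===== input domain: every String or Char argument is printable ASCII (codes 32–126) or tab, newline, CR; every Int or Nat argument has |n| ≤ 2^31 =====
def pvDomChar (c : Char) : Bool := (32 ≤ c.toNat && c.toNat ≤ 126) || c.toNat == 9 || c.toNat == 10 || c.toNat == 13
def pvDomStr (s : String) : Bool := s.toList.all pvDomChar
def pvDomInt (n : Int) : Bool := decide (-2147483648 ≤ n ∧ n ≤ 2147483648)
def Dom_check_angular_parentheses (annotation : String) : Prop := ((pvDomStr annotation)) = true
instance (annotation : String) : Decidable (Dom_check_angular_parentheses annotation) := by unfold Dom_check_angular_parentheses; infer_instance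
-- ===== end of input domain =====

-- B replaces A's per-character two-boolean state machine by a staged algorithm:
-- filter the brackets out first, then jump through them in opener/closer pairs,
-- skipping runs of same-direction repeats wholesale (objective: alternative).

-- ===== PORT A =====
-- state = (fastsequence, slowsequence)
def pvStepA (st : Bool × Bool) (char : Char) : Bool × Bool :=
  if char = '<' then
    if st.1 then (false, st.2)
    else if ¬ st.2 then (st.1, true)
    else st
  else if char = '>' then
    if st.2 then (st.1, false)
    else if ¬ st.1 then (true, st.2)
    else st
  else st

def check_angular_parentheses (annotation : String) : Bool :=
  let st := annotation.toList.foldl pvStepA (false, false)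
  if st.1 || st.2 then false else true

-- ===== PORT B =====
-- the outer while loop of Source B: take the opener, skip its run (the inner while
-- loop = dropWhile), demand a closer, continue after it
def pvConsume : List Char → Bool
  | [] => true
  | opener :: tail =>
    match h : tail.dropWhile (fun c => c == opener) with
    | [] => false
    | _ :: rest => pvConsume rest
termination_by l => l.length
decreasing_by
  have h1 : (tail.dropWhile (fun c => c == opener)).length ≤ tail.length :=
    tail.length_dropWhile_le _
  rw [h] at h1
  simp at h1 ⊢
  omega

def check_angular_parentheses_alt (annotation : String) : Bool :=
  pvConsume (annotation.toList.filter (fun c => c == '<' || c == '>'))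

-- ===== PRECONDITION & SPEC =====
def Spec_check_angular_parentheses (annotation : String) (out : Bool) : Prop := out = check_angular_parentheses_alt annotation
instance (annotation : String) (out : Bool) : Decidable (Spec_check_angular_parentheses annotation out) := by unfold Spec_check_angular_parentheses; infer_instance

-- ===== CLAIM (what is proved, stated in full; the proofs are below) =====
def Claim_equal_check_angular_parentheses : Prop := ∀ (annotation : String), Dom_check_angular_parentheses annotation → Spec_check_angular_parentheses annotation (check_angular_parentheses annotation)

-- ===== LEMMAS AND PROOFS =====

-- B's meaning continued from a pending state whose swallowed opener is `opener`
def pvConsumePend (opener : Char) (l : List Char) : Bool :=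
  match l.dropWhile (fun c => c == opener) with
  | [] => false
  | _ :: rest => pvConsume rest

-- B's meaning of an A-state (only the three reachable states matter)
def pvMeaning (st : Bool × Bool) (l : List Char) : Bool :=
  if st.1 then pvConsumePend '>' l
  else if st.2 then pvConsumePend '<' l
  else pvConsume l

theorem pvConsume_cons (b : Char) (tail : List Char) :
    pvConsume (b :: tail) = pvConsumePend b tail := by
  rw [pvConsume, pvConsumePend]
  split <;> rename_i h <;> simp [h]

theorem pvSim (l : List Char) (st : Bool × Bool) (h : ¬ (st.1 = true ∧ st.2 = true)) :
    (if (l.foldl pvStepA st).1 || (l.foldl pvStepA st).2 then false else true)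
      = pvMeaning st (l.filter (fun c => c == '<' || c == '>')) := by
  induction l generalizing st with
  | nil =>
    obtain ⟨f, s⟩ := st
    cases f <;> cases s <;> simp_all [pvMeaning, pvConsume, pvConsumePend]
  | cons c t ih =>
    simp only [List.foldl_cons, List.filter_cons]
    by_cases hb : (c == '<' || c == '>') = true
    · simp only [hb, if_pos]
      obtain ⟨f, s⟩ := st
      have hnext : ¬ ((pvStepA (f, s) c).1 = true ∧ (pvStepA (f, s) c).2 = true) := by
        cases f <;> cases s <;> simp_all [pvStepA] <;> split_ifs <;> simp_all
      refine (ih _ hnext).trans ?_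
      rcases (by simpa using hb : c = '<' ∨ c = '>') with hc | hc <;> subst hc <;>
        cases f <;> cases s <;>
          simp_all [pvStepA, pvMeaning, pvConsume_cons, pvConsumePend]
    · have hc1 : c ≠ '<' := by intro hc; subst hc; simp at hb
      have hc2 : c ≠ '>' := by intro hc; subst hc; simp at hb
      simp only [hb, Bool.false_eq_true, if_neg, not_false_eq_true,
        show pvStepA st c = st by simp [pvStepA, hc1, hc2]]
      exact ih st h

-- ===== VERDICT (by name: the statement is the Claim_ definition above) =====
theorem check_angular_parentheses_spec : Claim_equal_check_angular_parentheses := by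
  intro annotation _
  show _ = _
  unfold check_angular_parentheses check_angular_parentheses_alt
  simpa [pvMeaning] using pvSim annotation.toList (false, false) (by simp)
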